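-- pv_equiv track=rewrite | github.com/pawel90Five/Pesennik | utils.py | less_spaces
-- ===== SOURCE A (Python) =====
-- from math import ceil
--
-- def less_spaces(s:str, n:int=2) -> str:
--     """ returns string with less spaces by n times"""
--     spaces = 0
--     res = []
--     for i in range(len(s)):
--         if s[i] == ' ':
--             spaces += 1
--         else:
--             res.append(" " * ceil(spaces / n))
--             res.append(s[i])
--             spaces = 0
--     return ''.join(res)
-- ===== SOURCE B (Python) =====
-- import re
-- from math import ceil
--
-- def less_spaces(s: str, n: int = 2) -> str:
--     """Regex over maximal space runs: shrink each run by factor n; a run at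
--     end-of-string is dropped (matching the task's trailing-space behaviour)."""
--     def repl(m):
--         if m.end() == len(s):
--             return ''
--         return ' ' * ceil(len(m.group()) / n)
--     return re.sub(r' +', repl, s)
-- ===== Notes on version B (the rewrite author's own statement) =====
-- stated objective: idiomatic
-- what changed: Replaced the per-character space-counter scan that flushes on each non-space with re.sub(r' +', repl, s) over whole maximal space runs, where repl shrinks a run to ceil(len/n) spaces and drops a run that ends the string (C regex engine instead of a Python char loop).
import Mathlib
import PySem

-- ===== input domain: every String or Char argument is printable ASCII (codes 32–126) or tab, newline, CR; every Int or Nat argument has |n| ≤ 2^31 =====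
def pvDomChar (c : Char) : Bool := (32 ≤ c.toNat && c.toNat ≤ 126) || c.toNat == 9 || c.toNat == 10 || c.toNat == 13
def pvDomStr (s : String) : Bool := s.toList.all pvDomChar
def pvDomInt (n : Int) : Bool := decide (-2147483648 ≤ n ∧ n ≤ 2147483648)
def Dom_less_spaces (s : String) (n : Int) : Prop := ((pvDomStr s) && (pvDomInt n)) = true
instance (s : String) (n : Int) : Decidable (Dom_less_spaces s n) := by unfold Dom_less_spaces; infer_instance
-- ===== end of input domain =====

-- B re-implements A with re.sub over maximal space runs instead of a per-char counter scan;
-- objective: idiomatic. Equivalence is about the return value; neither mutates its argument.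

-- `ceil(k/n)` for integers (exact for the float `math.ceil(k/n)` on |k|,|n| ≤ 2^31): ceiling division,
-- clamped to Nat because Python's `' ' * m` is `''` for negative m.
def pvCeilDiv (a b : Int) : Nat := (-(PySem.Int.floordiv (-a) b)).toNat

-- ===== PORT A =====
-- counter scan: count spaces; on a non-space, flush ⌈spaces/n⌉ spaces and the char
def less_spaces (s : String) (n : Int) : String :=
  String.ofList
    (s.toList.foldl (fun (st : Int × List Char) (c : Char) =>
      if c = ' ' then (st.1 + 1, st.2)
      else (0, st.2 ++ List.replicate (pvCeilDiv st.1 n) ' ' ++ [c])) (0, [])).2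

-- ===== PORT B =====
-- hand-port of `re.sub(r' +', repl, s)`: scan maximal runs of spaces (exactly what the
-- regex ' +' matches, left to right); a run at end of string is replaced by '' (repl's
-- m.end() == len(s) branch), any other run by ⌈len/n⌉ spaces.
def altGo (n : Int) : List Char → List Char
  | [] => []
  | c :: cs =>
    if c = ' ' then
      let rest := cs.dropWhile (· = ' ')
      if rest.isEmpty then []
      else List.replicate (pvCeilDiv (1 + (cs.takeWhile (· = ' ')).length) n) ' ' ++ altGo n rest
    else c :: altGo n cs
  termination_by l => l.length
  decreasing_by
    · simpa using Nat.lt_succ_of_le (List.length_dropWhile_le (· = ' ') cs)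
    · simp

def less_spaces_alt (s : String) (n : Int) : String := String.ofList (altGo n s.toList)

-- ===== PRECONDITION & SPEC =====
-- A raises ZeroDivisionError (ceil(spaces/0)) when n = 0 and s has any non-space char;
-- Pre_ excludes exactly those inputs.
def Pre_less_spaces (s : String) (n : Int) : Prop := n = 0 → s.toList.all (· = ' ')
instance (s : String) (n : Int) : Decidable (Pre_less_spaces s n) := by unfold Pre_less_spaces; infer_instance
def pvWitness_less_spaces : String × Int := ("a  b   c ", 2)

def Spec_less_spaces (s : String) (n : Int) (out : String) : Prop := out = less_spaces_alt s n
instance (s : String) (n : Int) (out : String) : Decidable (Spec_less_spaces s n out) := by unfold Spec_less_spaces; infer_instance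

-- ===== CLAIM (what is proved, stated in full; the proofs are below) =====
def Claim_equal_less_spaces : Prop := ∀ (s : String) (n : Int), Dom_less_spaces s n → Pre_less_spaces s n → Spec_less_spaces s n (less_spaces s n)

-- ===== LEMMAS AND PROOFS =====

-- functional reading of A's loop body from a given space count
def emitA (n : Int) : Int → List Char → List Char
  | _, [] => []
  | sp, c :: cs =>
    if c = ' ' then emitA n (sp + 1) cs
    else List.replicate (pvCeilDiv sp n) ' ' ++ [c] ++ emitA n 0 cs

theorem foldl_emitA (n : Int) (l : List Char) : ∀ (sp : Int) (acc : List Char),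
    (l.foldl (fun (st : Int × List Char) (c : Char) =>
      if c = ' ' then (st.1 + 1, st.2)
      else (0, st.2 ++ List.replicate (pvCeilDiv st.1 n) ' ' ++ [c])) (sp, acc)).2
      = acc ++ emitA n sp l := by
  induction l with
  | nil => intro sp acc; simp [emitA]
  | cons c cs ih =>
    intro sp acc
    by_cases hc : c = ' '
    · rw [List.foldl_cons]
      simp only [hc, reduceIte]
      rw [ih (sp + 1) acc, emitA, if_pos rfl]
    · rw [List.foldl_cons]
      simp only [if_neg hc]
      rw [ih 0 _, emitA, if_neg hc]
      simp

theorem emitA_skip (n : Int) (l : List Char) : ∀ sp : Int,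
    emitA n sp l = emitA n (sp + (l.takeWhile (· = ' ')).length) (l.dropWhile (· = ' ')) := by
  induction l with
  | nil => intro sp; simp
  | cons c cs ih =>
    intro sp
    by_cases hc : c = ' '
    · subst hc
      rw [emitA, if_pos rfl, ih (sp + 1)]
      simp only [List.takeWhile, List.dropWhile, decide_true, List.length_cons]
      congr 1
      push_cast
      ring
    · simp [List.takeWhile, List.dropWhile, hc, emitA]

theorem pvCeilDiv_zero (n : Int) (_hn : n ≠ 0) : pvCeilDiv 0 n = 0 := by
  unfold pvCeilDiv PySem.Int.floordiv
  simp

theorem emitA_eq_altGo (n : Int) (hn : n ≠ 0) (l : List Char) : emitA n 0 l = altGo n l := by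
  induction hl : l.length using Nat.strong_induction_on generalizing l with
  | _ k ih =>
  subst hl
  match l with
  | [] => simp [emitA, altGo]
  | c :: cs =>
    by_cases hc : c = ' '
    · subst hc
      rw [altGo]
      simp only [reduceIte]
      rw [emitA_skip]
      have htake : (' ' :: cs).takeWhile (· = ' ') = ' ' :: cs.takeWhile (· = ' ') := by
        simp [List.takeWhile]
      have hdrop : (' ' :: cs).dropWhile (· = ' ') = cs.dropWhile (· = ' ') := by
        simp [List.dropWhile]
      rw [htake, hdrop]
      cases hrest : cs.dropWhile (· = ' ') with
      | nil => simp [emitA]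
      | cons d ds =>
        have hd : d ≠ ' ' := by
          have := List.head_dropWhile_not (fun x => decide (x = ' ')) (l := cs) (by simp [hrest])
          simp only [hrest, List.head_cons, decide_eq_false_iff_not] at this
          exact this
        have hlen : ds.length < (' ' :: cs).length := by
          have h1 : (d :: ds).length ≤ cs.length := hrest ▸ List.length_dropWhile_le _ cs
          simp at h1 ⊢; omega
        rw [emitA, if_neg hd, ih ds.length (by simpa using hlen) ds rfl]
        rw [altGo, if_neg hd]
        simp only [List.isEmpty_cons, Bool.false_eq_true, if_false]
        have harg : (0 : Int) + ((' ' :: cs.takeWhile (· = ' ')).length : Int) =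
            1 + ((cs.takeWhile (· = ' ')).length : Int) := by
          push_cast [List.length_cons]
          ring
        rw [harg]
        simp
    · rw [altGo]
      simp only [if_neg hc]
      have hlen : cs.length < (c :: cs).length := by simp
      rw [emitA, if_neg hc, ih cs.length hlen cs rfl, pvCeilDiv_zero n hn]
      simp

theorem emitA_all_spaces (n : Int) (l : List Char) (h : l.all (· = ' ')) :
    ∀ sp, emitA n sp l = [] := by
  induction l with
  | nil => intro sp; simp [emitA]
  | cons c cs ih =>
    intro sp
    simp only [List.all_cons, Bool.and_eq_true, decide_eq_true_eq] at h
    rw [emitA, if_pos h.1]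
    exact ih h.2 _

theorem altGo_all_spaces (n : Int) (l : List Char) (h : l.all (· = ' ')) : altGo n l = [] := by
  cases l with
  | nil => simp [altGo]
  | cons c cs =>
    simp only [List.all_cons, Bool.and_eq_true, decide_eq_true_eq] at h
    rw [altGo, if_pos h.1]
    have : cs.dropWhile (· = ' ') = [] := by
      rw [List.dropWhile_eq_nil_iff]
      intro x hx
      simpa using List.all_eq_true.mp h.2 x hx
    simp [this]

-- ===== VERDICT (by name: the statement is the Claim_ definition above) =====
theorem less_spaces_spec : Claim_equal_less_spaces := by
  intro s n _ hpre
  unfold Spec_less_spaces less_spaces less_spaces_alt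
  rw [foldl_emitA n s.toList 0 []]
  by_cases hn : n = 0
  · subst hn
    rw [emitA_all_spaces 0 s.toList (hpre rfl), altGo_all_spaces 0 s.toList (hpre rfl)]
    simp
  · rw [emitA_eq_altGo n hn]
    simp
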